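-- pv_equiv track=rewrite | github.com/aciderix/Graph-Systems-Exploration | numerical_semigroups/phases/verify_conjectures.py | compute_W_from_kunz
-- ===== SOURCE A (Python) =====
-- def compute_W_from_kunz(m, kunz_coords):
--     """
--     Given multiplicity m and Kunz coordinates a = [a_1, ..., a_{m-1}],
--     compute all semigroup invariants and Wilf number.
--     Apéry(i) = i + a_i * m for i=1..m-1, Apéry(0) = 0.
--     """
--     a = kunz_coords  # a[i] for i=1..m-1 (0-indexed: a[0] = a_1)
--
--     # Frobenius number = max(Apéry) - m
--     apery = [i+1 + a[i]*m for i in range(m-1)]  # Apéry(i+1) for i=0..m-2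
--     F = max(apery) - m
--
--     # Genus = sum of Kunz coordinates
--     g = sum(a)
--
--     # Conductor
--     c = F + 1
--
--     # Left elements
--     L = c - g  # = F + 1 - g
--
--     # Embedding dimension: count non-decomposable Apéry elements
--     # Apéry(r) is decomposable if Apéry(r) = Apéry(r1) + Apéry(r2) for some r1, r2 >= 1
--     # with r1 + r2 ≡ r (mod m)
--     n_decomposable = 0
--     for r in range(1, m):
--         decomposable = False
--         for r1 in range(1, m):
--             r2 = (r - r1) % m
--             if r2 == 0:
--                 continue  # would need r1 ≡ r mod m, i.e., r1 = r
--             # r2 is in 1..m-1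
--             # Check: Apéry(r1) + Apéry(r2) = Apéry(r)
--             # (r1 + a_{r1}*m) + (r2 + a_{r2}*m) = r + a_r * m
--             # (r1 + r2) + (a_{r1} + a_{r2})*m = r + a_r * m
--             # (r1+r2) mod m = r (guaranteed by construction)
--             # overflow = (r1+r2) // m (0 or 1)
--             # a_{r1} + a_{r2} + overflow = a_r
--             overflow = (r1 + r2) // m
--             if a[r1-1] + a[r2-1] + overflow == a[r-1]:
--                 decomposable = True
--                 break
--         if decomposable:
--             n_decomposable += 1
--
--     e = 1 + (m - 1) - n_decomposable  # 1 (for m itself) + non-decomposable count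
--     W = e * L - c
--
--     return e, L, c, F, g, W
-- ===== SOURCE B (Python) =====
-- def compute_W_from_kunz(m, kunz_coords):
--     """Same invariants via a precomputed pairwise-sum set instead of a per-r scan."""
--     apery = [i + 1 + kunz_coords[i] * m for i in range(m - 1)]
--     F = max(apery) - m
--     g = sum(kunz_coords)
--     c = F + 1
--     L = c - g
--     sums = {x + y for x in apery for y in apery}
--     n_decomposable = sum(1 for v in apery if v in sums)
--     e = m - n_decomposable
--     W = e * L - c
--     return e, L, c, F, g, W
-- ===== Notes on version B (the rewrite author's own statement) =====
-- stated objective: alternative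
-- what changed: The per-r inner scan over candidate r1 with break is replaced by precomputing the set of all pairwise Apery sums once and then deciding decomposability of each Apery element by a single membership pass; e is computed as m minus the decomposable count.
import Mathlib
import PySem

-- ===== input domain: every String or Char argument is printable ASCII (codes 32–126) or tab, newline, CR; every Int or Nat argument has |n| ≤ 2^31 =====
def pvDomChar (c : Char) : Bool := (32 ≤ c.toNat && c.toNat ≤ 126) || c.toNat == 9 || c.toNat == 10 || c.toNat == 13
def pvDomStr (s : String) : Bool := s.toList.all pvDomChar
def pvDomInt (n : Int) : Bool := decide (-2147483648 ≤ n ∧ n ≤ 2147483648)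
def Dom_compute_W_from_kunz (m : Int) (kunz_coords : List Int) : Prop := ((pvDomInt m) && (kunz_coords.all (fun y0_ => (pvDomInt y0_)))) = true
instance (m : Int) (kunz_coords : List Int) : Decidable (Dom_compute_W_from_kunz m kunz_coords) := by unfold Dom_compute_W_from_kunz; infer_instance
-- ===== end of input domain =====

-- B replaces A's per-r scan over candidate r1 by a precomputed set of all pairwise Apéry sums
-- plus a single membership pass (alternative decomposition; same asymptotic cost).


-- ===== PORT A =====
def compute_W_from_kunz (m : Int) (kunz_coords : List Int) : Int × Int × Int × Int × Int × Int :=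
  let a := kunz_coords
  let apery := (PySem.List.pyRange 0 (m - 1) 1).map (fun i => i + 1 + PySem.List.pyGetD a i 0 * m)
  let F := (PySem.List.max? apery (fun x => x)).getD 0 - m
  let g := a.sum
  let c := F + 1
  let L := c - g
  let n_decomposable := (PySem.List.pyRange 1 m 1).foldl (fun acc r =>
    let decomposable := (PySem.List.pyRange 1 m 1).any (fun r1 =>
      let r2 := PySem.Int.mod (r - r1) m
      if r2 = 0 then false
      else decide (PySem.List.pyGetD a (r1 - 1) 0 + PySem.List.pyGetD a (r2 - 1) 0
                     + PySem.Int.floordiv (r1 + r2) m = PySem.List.pyGetD a (r - 1) 0))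
    if decomposable then acc + 1 else acc) (0 : Int)
  let e := 1 + (m - 1) - n_decomposable
  let W := e * L - c
  (e, L, c, F, g, W)

-- ===== PORT B =====
def compute_W_from_kunz_alt (m : Int) (kunz_coords : List Int) : Int × Int × Int × Int × Int × Int :=
  let apery := (PySem.List.pyRange 0 (m - 1) 1).map (fun i => i + 1 + PySem.List.pyGetD kunz_coords i 0 * m)
  let F := (PySem.List.max? apery (fun x => x)).getD 0 - m
  let g := kunz_coords.sum
  let c := F + 1
  let L := c - g
  let sums := PySem.Set.ofList (apery.flatMap (fun x => apery.map (fun y => x + y)))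
  let n_decomposable := (apery.countP (fun v => PySem.Set.contains sums v) : Int)
  let e := m - n_decomposable
  let W := e * L - c
  (e, L, c, F, g, W)

-- ===== PRECONDITION & SPEC =====
-- Pre: exactly where Python A returns normally — m ≥ 2 (else max([]) raises ValueError)
-- and the coordinate list long enough for the indexing a[i], i < m-1 (else IndexError).
def Pre_compute_W_from_kunz (m : Int) (kunz_coords : List Int) : Prop :=
  2 ≤ m ∧ m - 1 ≤ (kunz_coords.length : Int)
instance (m : Int) (kunz_coords : List Int) : Decidable (Pre_compute_W_from_kunz m kunz_coords) := by
  unfold Pre_compute_W_from_kunz; infer_instance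

def pvWitness_compute_W_from_kunz : Int × List Int := (3, [2, 2])

def Spec_compute_W_from_kunz (m : Int) (kunz_coords : List Int) (out : Int × Int × Int × Int × Int × Int) : Prop := out = compute_W_from_kunz_alt m kunz_coords
instance (m : Int) (kunz_coords : List Int) (out : Int × Int × Int × Int × Int × Int) : Decidable (Spec_compute_W_from_kunz m kunz_coords out) := by unfold Spec_compute_W_from_kunz; infer_instance

-- ===== CLAIM (what is proved, stated in full; the proofs are below) =====
def Claim_equal_compute_W_from_kunz : Prop := ∀ (m : Int) (kunz_coords : List Int), Dom_compute_W_from_kunz m kunz_coords → Pre_compute_W_from_kunz m kunz_coords → Spec_compute_W_from_kunz m kunz_coords (compute_W_from_kunz m kunz_coords)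

-- ===== LEMMAS AND PROOFS =====

-- mod/floordiv values on the small ranges the loops produce
lemma pv_mod_small (x m : Int) (h0 : 0 ≤ x) (h1 : x < m) : PySem.Int.mod x m = x := by
  rw [PySem.Int.mod_eq_emod_of_pos (show (0:Int) < m by omega)]
  exact Int.emod_eq_of_lt h0 h1

lemma pv_mod_neg_small (x m : Int) (h0 : -m ≤ x) (h1 : x < 0) : PySem.Int.mod x m = x + m := by
  rw [PySem.Int.mod_eq_emod_of_pos (show (0:Int) < m by omega)]
  have : x % m = (x + m) % m := by
    conv_rhs => rw [show x + m = x + m * 1 by ring, Int.add_mul_emod_self_left]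
  rw [this]
  exact Int.emod_eq_of_lt (by omega) (by omega)

lemma pv_fd_zero (x m : Int) (h0 : 0 ≤ x) (h1 : x < m) : PySem.Int.floordiv x m = 0 := by
  rw [PySem.Int.floordiv_eq_iff_of_pos (show (0:Int) < m by omega)]
  constructor <;> omega

lemma pv_fd_one (x m : Int) (h0 : m ≤ x) (h1 : x < 2 * m) : PySem.Int.floordiv x m = 1 := by
  rw [PySem.Int.floordiv_eq_iff_of_pos (show (0:Int) < m by omega)]
  constructor <;> omega

-- the heart: A's scan-with-break condition for r is exactly "Apéry(r) is a sum of two Apéry values"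
lemma pv_key_iff (m : Int) (b : Int → Int) (r : Int) (hr1 : 1 ≤ r) (hrm : r < m) :
    (∃ r1, (1 ≤ r1 ∧ r1 < m) ∧ ¬ PySem.Int.mod (r - r1) m = 0 ∧
        b (r1 - 1) + b (PySem.Int.mod (r - r1) m - 1)
          + PySem.Int.floordiv (r1 + PySem.Int.mod (r - r1) m) m = b (r - 1))
  ↔ (∃ i, (0 ≤ i ∧ i < m - 1) ∧ ∃ j, (0 ≤ j ∧ j < m - 1) ∧
        (i + 1 + b i * m) + (j + 1 + b j * m) = r - 1 + 1 + b (r - 1) * m) := by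
  constructor
  · rintro ⟨r1, ⟨h11, h12⟩, hne, heq⟩
    by_cases hc : 0 ≤ r - r1
    · rw [pv_mod_small _ _ hc (by omega)] at hne heq
      rw [show r1 + (r - r1) = r by ring, pv_fd_zero r m (by omega) hrm] at heq
      refine ⟨r1 - 1, ⟨by omega, by omega⟩, r - r1 - 1, ⟨by omega, by omega⟩, ?_⟩
      have e1 : r1 - 1 + 1 = r1 := by ring
      have e2 : r - r1 - 1 + 1 = r - r1 := by ring
      rw [e1, e2] at *
      linear_combination m * heq
    · rw [pv_mod_neg_small _ _ (by omega) (by omega)] at hne heq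
      rw [show r1 + (r - r1 + m) = r + m by ring,
          pv_fd_one (r + m) m (by omega) (by omega)] at heq
      refine ⟨r1 - 1, ⟨by omega, by omega⟩, r - r1 + m - 1, ⟨by omega, by omega⟩, ?_⟩
      linear_combination m * heq
  · rintro ⟨i, ⟨hi0, hi1⟩, j, ⟨hj0, hj1⟩, heq⟩
    have hkm : i + j + 2 - r = (b (r - 1) - b i - b j) * m := by linear_combination heq
    have hk0 : 0 ≤ b (r - 1) - b i - b j := by
      by_contra h
      have h2 : (b (r - 1) - b i - b j) * m ≤ -1 * m :=
        mul_le_mul_of_nonneg_right (by omega) (by omega)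
      linarith
    have hk1 : b (r - 1) - b i - b j ≤ 1 := by
      by_contra h
      have h2 : 2 * m ≤ (b (r - 1) - b i - b j) * m :=
        mul_le_mul_of_nonneg_right (by omega) (by omega)
      linarith
    refine ⟨i + 1, ⟨by omega, by omega⟩, ?_, ?_⟩
    · -- r2 ≠ 0
      by_cases hle : i + 1 ≤ r
      · by_cases hr : i + 1 = r
        · -- then j + 1 = (b..)*m with 1 ≤ j+1 ≤ m-1 : k must be 0 and 1 at once → contradiction
          exfalso
          have : j + 1 = (b (r - 1) - b i - b j) * m := by linarith [hkm, hr]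
          interval_cases h : (b (r - 1) - b i - b j) <;> simp_all <;> omega
        · rw [pv_mod_small _ _ (by omega) (by omega)]; omega
      · rw [pv_mod_neg_small _ _ (by omega) (by omega)]; omega
    · -- the arithmetic condition
      rcases (by omega : b (r - 1) - b i - b j = 0 ∨ b (r - 1) - b i - b j = 1) with hk | hk
      · have hij : i + j + 2 = r := by
          have := hkm; rw [hk] at this; linarith
        have hmod : PySem.Int.mod (r - (i + 1)) m = j + 1 := by
          rw [show r - (i + 1) = j + 1 by omega]
          exact pv_mod_small _ _ (by omega) (by omega)
        rw [hmod, show i + 1 + (j + 1) = r by omega, pv_fd_zero r m (by omega) hrm,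
            show i + 1 - 1 = i by ring, show j + 1 - 1 = j by ring]
        omega
      · have hij : i + j + 2 = r + m := by
          have := hkm; rw [hk] at this; linarith
        have hmod : PySem.Int.mod (r - (i + 1)) m = j + 1 := by
          rw [show r - (i + 1) = j + 1 - m by omega]
          have := pv_mod_neg_small (j + 1 - m) m (by omega) (by omega)
          rw [this]; ring
        rw [hmod, show i + 1 + (j + 1) = r + m by omega,
            pv_fd_one (r + m) m (by omega) (by omega),
            show i + 1 - 1 = i by ring, show j + 1 - 1 = j by ring]
        omega

lemma pv_count_eq (m : Int) (a : List Int) :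
    List.foldl
      (fun acc r =>
        if ((PySem.List.pyRange 1 m 1).any fun r1 =>
              if PySem.Int.mod (r - r1) m = 0 then false
              else decide (PySem.List.pyGetD a (r1 - 1) 0 + PySem.List.pyGetD a (PySem.Int.mod (r - r1) m - 1) 0 +
                    PySem.Int.floordiv (r1 + PySem.Int.mod (r - r1) m) m = PySem.List.pyGetD a (r - 1) 0)) = true
        then acc + 1 else acc)
      (0 : Int) (PySem.List.pyRange 1 m 1) =
    (List.countP
        (fun v => (PySem.Set.ofList
              (List.flatMap (fun x => List.map (fun y => x + y) (List.map (fun i => i + 1 + PySem.List.pyGetD a i 0 * m) (PySem.List.pyRange 0 (m - 1) 1))) (List.map (fun i => i + 1 + PySem.List.pyGetD a i 0 * m) (PySem.List.pyRange 0 (m - 1) 1)))).contains v)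
        (List.map (fun i => i + 1 + PySem.List.pyGetD a i 0 * m) (PySem.List.pyRange 0 (m - 1) 1)) : Int) := by
  rw [PySem.List.foldl_if_add_one, zero_add]
  norm_cast
  rw [PySem.List.pyRange_one 1 m, PySem.List.pyRange_one 0 (m-1)]
  simp only [List.countP_map, sub_zero]
  apply List.countP_congr
  intro k hk
  simp only [List.mem_range] at hk
  simp only [Function.comp_apply, List.any_map, List.any_eq_true, List.mem_range, zero_add,
    PySem.Set.contains_iff, PySem.Set.mem_ofList, List.mem_flatMap,
    List.mem_map]
  have hkey := pv_key_iff m (fun i => PySem.List.pyGetD a i 0) (1 + (k : Int)) (by omega) (by omega)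
  simp only [] at hkey
  rw [show (1 : Int) + (k : Int) - 1 = (k : Int) by ring] at hkey ⊢
  constructor
  · rintro ⟨x, hx, hcond⟩
    by_cases h : PySem.Int.mod (1 + (k : Int) - (1 + (x : Int))) m = 0
    · rw [if_pos h] at hcond
      exact absurd hcond (by simp)
    · rw [if_neg h, decide_eq_true_eq] at hcond
      have harg : (1 : Int) ≤ 1 + (x : Int) ∧ 1 + (x : Int) < m := ⟨by clear hkey hcond h; omega, by clear hkey hcond h; omega⟩
      obtain ⟨i, ⟨hi0, hi1⟩, j, ⟨hj0, hj1⟩, heq⟩ := hkey.mp ⟨1 + (x : Int), harg, h, hcond⟩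
      have hicast : ((i.toNat : Int)) = i := Int.toNat_of_nonneg hi0
      have hjcast : ((j.toNat : Int)) = j := Int.toNat_of_nonneg hj0
      have hilt : i.toNat < (m - 1).toNat := by clear hkey hcond h; omega
      have hjlt : j.toNat < (m - 1).toNat := by clear hkey hcond h; omega
      exact ⟨i + 1 + PySem.List.pyGetD a i 0 * m, ⟨i, ⟨i.toNat, hilt, hicast⟩, rfl⟩,
        j + 1 + PySem.List.pyGetD a j 0 * m, ⟨j, ⟨j.toNat, hjlt, hjcast⟩, rfl⟩, heq⟩
  · rintro ⟨v1, ⟨i, ⟨ni, hni, rfl⟩, rfl⟩, v2, ⟨j, ⟨nj, hnj, rfl⟩, rfl⟩, heq⟩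
    have hargi : (0 : Int) ≤ (ni : Int) ∧ (ni : Int) < m - 1 := ⟨by clear hkey heq; omega, by clear hkey heq; omega⟩
    have hargj : (0 : Int) ≤ (nj : Int) ∧ (nj : Int) < m - 1 := ⟨by clear hkey heq; omega, by clear hkey heq; omega⟩
    obtain ⟨r1, ⟨h1, h2⟩, hne, hcond⟩ := hkey.mpr ⟨(ni : Int), hargi, (nj : Int), hargj, heq⟩
    have hr1lt : (r1 - 1).toNat < (m - 1).toNat := by clear hkey hne hcond heq; omega
    refine ⟨(r1 - 1).toNat, hr1lt, ?_⟩
    rw [show (1 : Int) + ((r1 - 1).toNat : Int) = r1 by clear hkey hne hcond heq; omega]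
    rw [if_neg hne, decide_eq_true_eq]
    exact hcond

-- ===== VERDICT (by name: the statement is the Claim_ definition above) =====
theorem compute_W_from_kunz_spec : Claim_equal_compute_W_from_kunz := by
  unfold Claim_equal_compute_W_from_kunz
  intro m a hdom hpre
  unfold Spec_compute_W_from_kunz compute_W_from_kunz compute_W_from_kunz_alt
  simp only [Prod.mk.injEq]
  rw [pv_count_eq m a]
  exact ⟨by ring, trivial, trivial, trivial, trivial, by ring⟩
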